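-- pv_equiv track=rewrite | github.com/clening/RSSKeywordParse | palantir_mcp_server.py | create_overview
-- ===== SOURCE A (Python) =====
-- from typing import Any, Dict, List, Optional
--
-- def create_overview(items: List[Dict], time_period: str) -> str:
--     """Create overview section."""
--     total_items = len(items)
--
--     # Categorize items
--     contracts = sum(1 for item in items if "contract" in item.get("content", "").lower())
--     news = sum(1 for item in items if item.get("source", "").lower() in ["news", "rss"])
--     government = sum(1 for item in items if "federal" in item.get("source", "").lower())
--
--     overview = f"During the {time_period}, {total_items} intelligence items were collected and analyzed. "
--     overview += f"This includes {contracts} contract-related items, {news} news articles, "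
--     overview += f"and {government} government documents. "
--
--     return overview
-- ===== SOURCE B (Python) =====
-- def create_overview(items, time_period):
--     """Create overview section (single pass with three counters instead of three sum-comprehensions)."""
--     total_items = len(items)
--     contracts = news = government = 0
--     for item in items:
--         content = item.get("content", "").lower()
--         source = item.get("source", "").lower()
--         if "contract" in content:
--             contracts += 1
--         if source in ("news", "rss"):
--             news += 1
--         if "federal" in source:
--             government += 1
--     overview = (
--         f"During the {time_period}, {total_items} intelligence items were collected and analyzed. "
--         f"This includes {contracts} contract-related items, {news} news articles, "
--         f"and {government} government documents. "
--     )
--     return overview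
-- ===== Notes on version B (the rewrite author's own statement) =====
-- stated objective: simpler
-- what changed: Replaces the three separate sum-generator passes over items with one explicit loop that maintains three independent counters (three non-exclusive if tests per item).
import Mathlib
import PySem

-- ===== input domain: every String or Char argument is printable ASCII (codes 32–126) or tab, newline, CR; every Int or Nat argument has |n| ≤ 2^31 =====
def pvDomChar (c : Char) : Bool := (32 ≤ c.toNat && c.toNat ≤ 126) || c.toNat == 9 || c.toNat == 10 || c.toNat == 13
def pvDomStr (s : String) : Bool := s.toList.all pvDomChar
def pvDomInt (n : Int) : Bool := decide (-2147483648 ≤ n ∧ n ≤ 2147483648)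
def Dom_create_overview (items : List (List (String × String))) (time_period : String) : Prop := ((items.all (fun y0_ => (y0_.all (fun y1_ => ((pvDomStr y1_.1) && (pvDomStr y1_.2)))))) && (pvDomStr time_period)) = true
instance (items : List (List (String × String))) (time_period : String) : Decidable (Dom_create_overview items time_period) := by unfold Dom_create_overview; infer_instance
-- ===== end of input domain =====

-- B replaces A's three separate counting passes over items with one loop carrying three counters; objective: simpler.

-- item.get(key, "") on a Python dict (association list under the type convention)
def pvGetKey (item : List (String × String)) (key : String) : String :=
  (PySem.Dict.ofList item).getD key ""

-- ===== PORT A =====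
def create_overview (items : List (List (String × String))) (time_period : String) : String :=
  let total_items : Int := (items.length : Int)
  let contracts : Int :=
    ((items.countP (fun item => PySem.Str.isIn "contract" (PySem.Str.lower (pvGetKey item "content"))) : Nat) : Int)
  let news : Int :=
    ((items.countP (fun item =>
        (PySem.Str.lower (pvGetKey item "source") == "news") ||
        (PySem.Str.lower (pvGetKey item "source") == "rss")) : Nat) : Int)
  let government : Int :=
    ((items.countP (fun item => PySem.Str.isIn "federal" (PySem.Str.lower (pvGetKey item "source"))) : Nat) : Int)
  let overview := "During the " ++ time_period ++ ", " ++ PySem.Int.toStr total_items ++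
    " intelligence items were collected and analyzed. "
  let overview := overview ++ "This includes " ++ PySem.Int.toStr contracts ++
    " contract-related items, " ++ PySem.Int.toStr news ++ " news articles, "
  let overview := overview ++ "and " ++ PySem.Int.toStr government ++ " government documents. "
  overview

-- ===== PORT B =====
def pvStep (acc : Int × Int × Int) (item : List (String × String)) : Int × Int × Int :=
  let content := PySem.Str.lower (pvGetKey item "content")
  let source := PySem.Str.lower (pvGetKey item "source")
  let c := if PySem.Str.isIn "contract" content then acc.1 + 1 else acc.1
  let n := if source == "news" || source == "rss" then acc.2.1 + 1 else acc.2.1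
  let g := if PySem.Str.isIn "federal" source then acc.2.2 + 1 else acc.2.2
  (c, n, g)

def create_overview_alt (items : List (List (String × String))) (time_period : String) : String :=
  let total_items : Int := (items.length : Int)
  let cnt := items.foldl pvStep (0, 0, 0)
  "During the " ++ time_period ++ ", " ++ PySem.Int.toStr total_items ++
    " intelligence items were collected and analyzed. " ++
    "This includes " ++ PySem.Int.toStr cnt.1 ++ " contract-related items, " ++
    PySem.Int.toStr cnt.2.1 ++ " news articles, " ++
    "and " ++ PySem.Int.toStr cnt.2.2 ++ " government documents. "

-- ===== PRECONDITION & SPEC =====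
def Spec_create_overview (items : List (List (String × String))) (time_period : String) (out : String) : Prop := out = create_overview_alt items time_period
instance (items : List (List (String × String))) (time_period : String) (out : String) : Decidable (Spec_create_overview items time_period out) := by unfold Spec_create_overview; infer_instance

-- ===== CLAIM (what is proved, stated in full; the proofs are below) =====
def Claim_equal_create_overview : Prop := ∀ (items : List (List (String × String))) (time_period : String), Dom_create_overview items time_period → Spec_create_overview items time_period (create_overview items time_period)

-- ===== LEMMAS AND PROOFS =====
lemma foldl_pvStep (items : List (List (String × String))) (a b c : Int) :
    items.foldl pvStep (a, b, c) =
      (a + ((items.countP (fun item => PySem.Str.isIn "contract" (PySem.Str.lower (pvGetKey item "content"))) : Nat) : Int),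
       b + ((items.countP (fun item =>
              (PySem.Str.lower (pvGetKey item "source") == "news") ||
              (PySem.Str.lower (pvGetKey item "source") == "rss")) : Nat) : Int),
       c + ((items.countP (fun item => PySem.Str.isIn "federal" (PySem.Str.lower (pvGetKey item "source"))) : Nat) : Int)) := by
  induction items generalizing a b c with
  | nil => simp
  | cons x xs ih =>
    simp only [List.foldl_cons, List.countP_cons, pvStep, ih]
    split_ifs <;> simp_all <;> omega

-- ===== VERDICT (by name: the statement is the Claim_ definition above) =====
theorem create_overview_spec : Claim_equal_create_overview := by
  intro items time_period _
  show _ = _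
  simp only [create_overview, create_overview_alt, foldl_pvStep, Int.zero_add]
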